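-- pv_equiv track=rewrite | github.com/thalium/icebox | third_party/libdwarf/libdwarf-20190110/bugxml/bugrecord.py | paralines
-- ===== SOURCE A (Python) =====
-- def xmlize(linea,inhtml,inpre):
--   outi =  []
--   l = linea
--   if l.find("<pre>") != -1:
--      if inhtml == 'y':
--        s2 = '</p>' +l + '\n'
--      else:
--        s2 = l + '\n'
--      inpre = 'y'
--      return s2,inpre
--   if l.find("</pre>") != -1:
--      if inhtml == 'y':
--        s2 = l + '\n' + "<p>"
--      else:
--        s2 = l + '\n'
--      inpre = 'n'
--      return s2, inpre
--   if inpre == 'y' and inhtml == 'n':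
--     outi += ["<preline>"]
--   for c in l:
--     if c == '<':
--        outi += ["&lt;"]
--     elif c == '>':
--        outi += ["&gt;"]
--     elif c == "&":
--        outi += ["&amp;"]
--     #elif c == "'":
--     #   outi += ["&apos;"]
--     elif c == '"':
--        outi += ["&quot;"]
--     else:
--        outi += [c]
--   if inpre == 'y' and inhtml == 'n':
--     outi += ["</preline>"]
--   outi += ["\n"]
--   s2 = ''.join(outi)
--   return s2,inpre
--
-- def paralines(name,lines):
--   inpre = 'n'
--   if len(lines) <1:
--     out = "<p>" + name + ":"+ "</p>"
--     return out
--   out = "<p>" + name + ": "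
--   for lin in lines:
--      f,inpre = xmlize(lin,'y',inpre)
--      out += f
--   out += "</p>"
--   return out;
-- ===== SOURCE B (Python) =====
-- def _render(l):
--     if "<pre>" in l:
--         return "</p>" + l + "\n"
--     if "</pre>" in l:
--         return l + "\n<p>"
--     return (l.replace("&", "&amp;").replace("<", "&lt;")
--              .replace(">", "&gt;").replace('"', "&quot;")) + "\n"
--
-- def paralines(name, lines):
--     if not lines:
--         return "<p>" + name + ":</p>"
--     return "<p>" + name + ": " + "".join(_render(l) for l in lines) + "</p>"
-- ===== Notes on version B (the rewrite author's own statement) =====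
-- stated objective: idiomatic
-- what changed: B replaces A's per-character append loop and inpre threading with an ordered whole-string replace chain (& first, quote escaped, apostrophe untouched) applied per line and a single join (constant-factor speedup: C-level str.replace passes instead of a Python char loop); the dead inpre state (inhtml is always 'y' in paralines, so the <preline> wrapping never fires) is dropped.
import Mathlib
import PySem

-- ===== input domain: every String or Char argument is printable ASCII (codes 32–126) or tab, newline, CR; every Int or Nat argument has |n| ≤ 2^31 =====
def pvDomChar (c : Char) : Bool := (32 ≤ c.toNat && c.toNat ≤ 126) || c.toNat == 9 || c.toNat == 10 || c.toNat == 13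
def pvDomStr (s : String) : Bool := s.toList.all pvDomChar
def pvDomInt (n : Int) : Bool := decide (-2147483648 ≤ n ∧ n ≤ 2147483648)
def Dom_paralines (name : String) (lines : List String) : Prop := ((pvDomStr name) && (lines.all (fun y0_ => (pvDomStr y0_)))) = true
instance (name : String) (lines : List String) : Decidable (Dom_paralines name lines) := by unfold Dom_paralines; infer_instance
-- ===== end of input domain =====

-- B rewrites xmlize's per-character escaping as an ordered str.replace chain per line (idiomatic, same cost).


-- ===== PORT A =====
-- the body of xmlize's `for c in l` loop, appending the escape piece for one character
def xmlizeStep (acc : List String) (c : Char) : List String :=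
  if c == '<' then acc ++ ["&lt;"]
  else if c == '>' then acc ++ ["&gt;"]
  else if c == '&' then acc ++ ["&amp;"]
  else if c == '"' then acc ++ ["&quot;"]
  else acc ++ [c.toString]

def xmlize (linea inhtml inpre : String) : String × String :=
  let l := linea
  if PySem.Str.find l "<pre>" ≠ -1 then
    (if inhtml == "y" then "</p>" ++ l ++ "\n" else l ++ "\n", "y")
  else if PySem.Str.find l "</pre>" ≠ -1 then
    (if inhtml == "y" then l ++ "\n" ++ "<p>" else l ++ "\n", "n")
  else
    let outi : List String := []
    let outi := if inpre == "y" && inhtml == "n" then outi ++ ["<preline>"] else outi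
    let outi := l.toList.foldl xmlizeStep outi
    let outi := if inpre == "y" && inhtml == "n" then outi ++ ["</preline>"] else outi
    let outi := outi ++ ["\n"]
    (PySem.Str.join "" outi, inpre)

def paralines (name : String) (lines : List String) : String :=
  let inpre := "n"
  if lines.length < 1 then "<p>" ++ name ++ ":" ++ "</p>"
  else
    let st := lines.foldl (fun (st : String × String) lin =>
      let r := xmlize lin "y" st.2
      (st.1 ++ r.1, r.2)) ("<p>" ++ name ++ ": ", inpre)
    st.1 ++ "</p>"

-- ===== PORT B =====
def renderLine (l : String) : String :=
  if PySem.Str.isIn "<pre>" l then "</p>" ++ l ++ "\n"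
  else if PySem.Str.isIn "</pre>" l then l ++ "\n<p>"
  else PySem.Str.replace (PySem.Str.replace (PySem.Str.replace
         (PySem.Str.replace l "&" "&amp;") "<" "&lt;") ">" "&gt;") "\"" "&quot;" ++ "\n"

def paralines_alt (name : String) (lines : List String) : String :=
  if lines.isEmpty then "<p>" ++ name ++ ":</p>"
  else "<p>" ++ name ++ ": " ++ PySem.Str.join "" (lines.map renderLine) ++ "</p>"

-- ===== PRECONDITION & SPEC =====
def Spec_paralines (name : String) (lines : List String) (out : String) : Prop := out = paralines_alt name lines
instance (name : String) (lines : List String) (out : String) : Decidable (Spec_paralines name lines out) := by unfold Spec_paralines; infer_instance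

-- ===== CLAIM (what is proved, stated in full; the proofs are below) =====
def Claim_equal_paralines : Prop := ∀ (name : String) (lines : List String), Dom_paralines name lines → Spec_paralines name lines (paralines name lines)

-- ===== LEMMAS AND PROOFS =====

-- single-character escape result, in A's branch order
def escChar (c : Char) : List Char :=
  if c == '<' then "&lt;".toList
  else if c == '>' then "&gt;".toList
  else if c == '&' then "&amp;".toList
  else if c == '"' then "&quot;".toList
  else [c]

theorem join_nil_eq_flatten : ∀ (ps : List (List Char)), PySem.Chars.join [] ps = ps.flatten
  | [] => rfl
  | [a] => by simp [PySem.Chars.join, List.intercalate]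
  | a :: b :: t => by
      have ih := join_nil_eq_flatten (b :: t)
      simp only [PySem.Chars.join, List.intercalate, List.intersperse] at ih ⊢
      simp [ih]

theorem replace_go_singleton (c : Char) (new : List Char) :
    ∀ (l : List Char) (fuel : Nat) (acc : List Char), l.length ≤ fuel →
      PySem.Chars.replace.go [c] new fuel l acc
        = acc.reverse ++ l.flatMap (fun x => if x == c then new else [x]) := by
  intro l
  induction l with
  | nil =>
    intro fuel acc _
    cases fuel <;> simp [PySem.Chars.replace.go]
  | cons a t ih =>
    intro fuel acc h
    cases fuel with
    | zero => simp at h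
    | succ f =>
      simp only [PySem.Chars.replace.go]
      by_cases hac : a = c
      · subst hac
        have hpre : [a].isPrefixOf (a :: t) = true := by simp [List.isPrefixOf]
        rw [if_pos hpre, show List.drop [a].length (a :: t) = t from rfl]
        rw [ih f (new.reverse ++ acc) (Nat.le_of_succ_le_succ (by simpa using h))]
        simp
      · have hpre : [c].isPrefixOf (a :: t) = false := by
          simp [List.isPrefixOf]
          exact fun hh => absurd hh.symm hac
        rw [if_neg (by simp [hpre])]
        rw [ih f (a :: acc) (Nat.le_of_succ_le_succ (by simpa using h))]
        simp [hac]

theorem replace_singleton (cs : List Char) (c : Char) (new : List Char) :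
    PySem.Chars.replace cs [c] new = cs.flatMap (fun x => if x == c then new else [x]) := by
  unfold PySem.Chars.replace
  rw [if_neg (by simp)]
  exact replace_go_singleton c new cs cs.length [] (le_refl _)

theorem chain_eq_escChar (cs : List Char) :
    ((((cs.flatMap (fun x => if x == '&' then "&amp;".toList else [x])).flatMap
        (fun x => if x == '<' then "&lt;".toList else [x])).flatMap
        (fun x => if x == '>' then "&gt;".toList else [x])).flatMap
        (fun x => if x == '"' then "&quot;".toList else [x]))
      = cs.flatMap escChar := by
  induction cs with
  | nil => rfl
  | cons a t ih =>
    simp only [List.flatMap_cons, List.flatMap_append] at *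
    rw [ih]
    congr 1
    by_cases h1 : a = '&'
    · subst h1; decide
    by_cases h2 : a = '<'
    · subst h2; decide
    by_cases h3 : a = '>'
    · subst h3; decide
    by_cases h4 : a = '"'
    · subst h4; decide
    simp [escChar, h1, h2, h3, h4]

theorem toList_renderChain (l : String) :
    (PySem.Str.replace (PySem.Str.replace (PySem.Str.replace
        (PySem.Str.replace l "&" "&amp;") "<" "&lt;") ">" "&gt;") "\"" "&quot;").toList
      = l.toList.flatMap escChar := by
  simp only [PySem.Str.toList_replace]
  rw [show ("&" : String).toList = ['&'] from rfl,
      show ("<" : String).toList = ['<'] from rfl,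
      show (">" : String).toList = ['>'] from rfl,
      show ("\"" : String).toList = ['"'] from rfl]
  rw [replace_singleton, replace_singleton, replace_singleton, replace_singleton]
  exact chain_eq_escChar l.toList

theorem toList_join_empty (parts : List String) :
    (PySem.Str.join "" parts).toList = (parts.map String.toList).flatten := by
  rw [PySem.Str.toList_join]
  exact join_nil_eq_flatten _

theorem foldl_xmlizeStep (cs : List Char) :
    ∀ (acc : List String),
      ((cs.foldl xmlizeStep acc).map String.toList).flatten
        = ((acc.map String.toList)).flatten ++ cs.flatMap escChar := by
  induction cs with
  | nil => intro acc; simp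
  | cons a t ih =>
    intro acc
    rw [List.foldl_cons, ih]
    have hstep : ((xmlizeStep acc a).map String.toList).flatten
        = (acc.map String.toList).flatten ++ escChar a := by
      unfold xmlizeStep escChar
      by_cases h1 : a = '<'
      · subst h1; simp
      by_cases h2 : a = '>'
      · subst h2; simp
      by_cases h3 : a = '&'
      · subst h3; simp
      by_cases h4 : a = '"'
      · subst h4; simp
      simp [h1, h2, h3, h4]
    rw [hstep]
    simp

theorem xmlize_fst (lin p : String) :
    (xmlize lin "y" p).1 = renderLine lin := by
  unfold xmlize renderLine
  have e1 : (PySem.Str.isIn "<pre>" lin = true) ↔ (PySem.Str.find lin "<pre>" ≠ -1) := by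
    rw [PySem.Str.isIn_eq, PySem.Str.find_eq, PySem.Chars.isIn_iff_infix,
        ← PySem.Chars.find_ne_neg_one_iff]
  have e2 : (PySem.Str.isIn "</pre>" lin = true) ↔ (PySem.Str.find lin "</pre>" ≠ -1) := by
    rw [PySem.Str.isIn_eq, PySem.Str.find_eq, PySem.Chars.isIn_iff_infix,
        ← PySem.Chars.find_ne_neg_one_iff]
  by_cases h1 : PySem.Str.find lin "<pre>" ≠ -1
  · rw [if_pos h1, if_pos (e1.mpr h1)]
    simp
  · rw [if_neg h1, if_neg (fun hh => h1 (e1.mp hh))]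
    by_cases h2 : PySem.Str.find lin "</pre>" ≠ -1
    · rw [if_pos h2, if_pos (e2.mpr h2)]
      apply String.toList_inj.mp
      simp [String.toList_append]
    · rw [if_neg h2, if_neg (fun hh => h2 (e2.mp hh))]
      simp only [show (("y" : String) == "n") = false from rfl, Bool.and_false,
        Bool.false_eq_true, if_false]
      apply String.toList_inj.mp
      rw [toList_join_empty]
      rw [List.map_append, List.flatten_append, foldl_xmlizeStep]
      rw [String.toList_append, toList_renderChain]
      simp

theorem foldl_lines (lines : List String) :
    ∀ (out p : String),
      ((lines.foldl (fun (st : String × String) lin =>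
          let r := xmlize lin "y" st.2
          (st.1 ++ r.1, r.2)) (out, p)).1)
        = out ++ PySem.Str.join "" (lines.map renderLine) := by
  induction lines with
  | nil =>
    intro out p
    apply String.toList_inj.mp
    simp [String.toList_append]
  | cons a t ih =>
    intro out p
    simp only [List.foldl_cons]
    rw [ih]
    apply String.toList_inj.mp
    simp only [String.toList_append, toList_join_empty, List.map_cons, List.map_map,
      List.flatten_cons, xmlize_fst]
    simp

-- ===== VERDICT (by name: the statement is the Claim_ definition above) =====
theorem paralines_spec : Claim_equal_paralines := by
  intro name lines _
  unfold Spec_paralines paralines paralines_alt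
  cases lines with
  | nil =>
    simp only [List.length_nil, List.isEmpty_nil]
    norm_num
    apply String.toList_inj.mp
    simp [String.toList_append]
  | cons a t =>
    simp only [List.length_cons, List.isEmpty_cons]
    norm_num
    rw [foldl_lines]
    apply String.toList_inj.mp
    simp [String.toList_append, xmlize_fst, join_nil_eq_flatten]
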